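-- pv_equiv track=rewrite | github.com/Haksell/codeforces | 1948B.py | solve
-- ===== SOURCE A (Python) =====
-- def solve(a):
--     prev = 99
--     for ai in reversed(a):
--         if ai <= prev:
--             prev = ai
--         else:
--             if ai < 10:
--                 return False
--             t, u = divmod(ai, 10)
--             if t > u or u > prev:
--                 return False
--             prev = t
--     return True
-- ===== SOURCE B (Python) =====
-- def solve(a):
--     # Forward greedy: `last` is the value the next emitted token must not go below
--     # (None = no constraint yet). Splitting (when legal) is always preferred since
--     # it leaves the smallest possible `last`; tokens must be two-digit at most.
--     last = None
--     for ai in a: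
--         if ai >= 100:
--             return False
--         t, u = divmod(ai, 10)
--         if 10 <= ai and t <= u and (last is None or last <= t):
--             last = u
--         elif last is None or last <= ai:
--             last = ai
--         else:
--             return False
--     return True
-- ===== Notes on version B (the rewrite author's own statement) =====
-- stated objective: alternative
-- what changed: Replaces A's right-to-left scan (tracking the upper bound `prev` the next element to the left must respect, preferring to keep elements whole) by a left-to-right greedy tracking the lower bound `last` the next token must meet, preferring to split because that leaves the smallest bound.
import Mathlib
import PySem

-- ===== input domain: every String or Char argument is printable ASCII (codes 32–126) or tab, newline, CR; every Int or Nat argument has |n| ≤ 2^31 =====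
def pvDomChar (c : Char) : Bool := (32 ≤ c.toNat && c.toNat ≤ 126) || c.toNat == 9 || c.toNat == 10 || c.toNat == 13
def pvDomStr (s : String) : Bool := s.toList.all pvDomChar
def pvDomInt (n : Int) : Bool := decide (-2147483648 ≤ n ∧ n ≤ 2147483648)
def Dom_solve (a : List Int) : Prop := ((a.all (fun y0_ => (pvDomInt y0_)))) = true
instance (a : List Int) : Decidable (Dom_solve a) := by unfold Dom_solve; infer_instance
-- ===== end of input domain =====

-- B replaces A's right-to-left scan (upper bound `prev`, preferring to keep whole)
-- by a left-to-right greedy (lower bound `last`, preferring to split): alternative decomposition.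

-- ===== PORT A =====
-- loop "for ai in reversed(a)" with state prev and early returns
def solveA (prev : Int) : List Int → Bool
  | [] => true
  | ai :: rest =>
    if ai ≤ prev then solveA ai rest
    else if ai < 10 then false
    else
      let t := PySem.Int.floordiv ai 10
      let u := PySem.Int.mod ai 10
      if t > u ∨ u > prev then false else solveA t rest

def solve (a : List Int) : Bool := solveA 99 a.reverse

-- ===== PORT B =====
-- "last is None or last <= x"
def leOpt (lo : Option Int) (x : Int) : Bool :=
  match lo with
  | none => true
  | some v => v ≤ x

def solveB (last : Option Int) : List Int → Bool
  | [] => true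
  | ai :: rest =>
    if 100 ≤ ai then false
    else
      let t := PySem.Int.floordiv ai 10
      let u := PySem.Int.mod ai 10
      if 10 ≤ ai ∧ t ≤ u ∧ leOpt last t = true then solveB (some u) rest
      else if leOpt last ai = true then solveB (some ai) rest
      else false

def solve_alt (a : List Int) : Bool := solveB none a

-- ===== PRECONDITION & SPEC =====
def Spec_solve (a : List Int) (out : Bool) : Prop := out = solve_alt a
instance (a : List Int) (out : Bool) : Decidable (Spec_solve a out) := by unfold Spec_solve; infer_instance

-- ===== CLAIM (what is proved, stated in full; the proofs are below) =====
def Claim_equal_solve : Prop := ∀ (a : List Int), Dom_solve a → Spec_solve a (solve a)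

-- ===== LEMMAS AND PROOFS =====

-- Specification predicate: the elements can be laid out (each kept whole, or split into
-- its two digits t ≤ u when 10 ≤ ai) as a nondecreasing token chain whose first token is
-- ≥ lo (none = unconstrained) and whose last token is ≤ hi.
def CanLH (lo : Option Int) (hi : Int) : List Int → Prop
  | [] => leOpt lo hi = true
  | ai :: rest =>
    (leOpt lo ai = true ∧ CanLH (some ai) hi rest) ∨
    (10 ≤ ai ∧ PySem.Int.floordiv ai 10 ≤ PySem.Int.mod ai 10 ∧
      leOpt lo (PySem.Int.floordiv ai 10) = true ∧ CanLH (some (PySem.Int.mod ai 10)) hi rest)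

theorem fd10 (ai : Int) : PySem.Int.floordiv ai 10 = ai / 10 :=
  PySem.Int.floordiv_eq_ediv_of_pos (by omega)

theorem md10 (ai : Int) : PySem.Int.mod ai 10 = ai % 10 :=
  PySem.Int.mod_eq_emod_of_pos (by omega)

theorem mod10_bounds (ai : Int) : 0 ≤ PySem.Int.mod ai 10 ∧ PySem.Int.mod ai 10 < 10 := by
  rw [md10]; omega

theorem floordiv10_ge (ai : Int) (h : 100 ≤ ai) : 10 ≤ PySem.Int.floordiv ai 10 := by
  rw [fd10]; omega

theorem canLH_mono_hi : ∀ (a : List Int) (lo : Option Int) {hi hi' : Int},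
    hi ≤ hi' → CanLH lo hi a → CanLH lo hi' a := by
  intro a
  induction a with
  | nil =>
    intro lo hi hi' hle h
    cases lo
    · simp [CanLH, leOpt]
    · simp [CanLH, leOpt] at h ⊢; omega
  | cons ai rest ih =>
    intro lo hi hi' hle h
    rcases h with ⟨h1, h2⟩ | ⟨h1, h2, h3, h4⟩
    · exact Or.inl ⟨h1, ih _ hle h2⟩
    · exact Or.inr ⟨h1, h2, h3, ih _ hle h4⟩

theorem canLH_mono_lo : ∀ (a : List Int) {v' v hi : Int},
    v' ≤ v → CanLH (some v) hi a → CanLH (some v') hi a := by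
  intro a
  induction a with
  | nil => intro v' v hi hle h; simp [CanLH, leOpt] at h ⊢; omega
  | cons ai rest _ =>
    intro v' v hi hle h
    rcases h with ⟨h1, h2⟩ | ⟨h1, h2, h3, h4⟩
    · refine Or.inl ⟨?_, h2⟩; simp [leOpt] at h1 ⊢; omega
    · refine Or.inr ⟨h1, h2, ?_, h4⟩; simp [leOpt] at h3 ⊢; omega

theorem canLH_some_le : ∀ (a : List Int) {v hi : Int}, CanLH (some v) hi a → v ≤ hi := by
  intro a
  induction a with
  | nil => intro v hi h; simpa [CanLH, leOpt] using h
  | cons ai rest ih =>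
    intro v hi h
    rcases h with ⟨h1, h2⟩ | ⟨h1, h2, h3, h4⟩
    · have := ih h2; simp [leOpt] at h1; omega
    · have := ih h4; have hfd := fd10 ai; have hmd := md10 ai
      simp [leOpt] at h3; omega

theorem canLH_snoc : ∀ (xs : List Int) (lo : Option Int) (hi x : Int),
    CanLH lo hi (xs ++ [x]) ↔
      ((x ≤ hi ∧ CanLH lo x xs) ∨
        (10 ≤ x ∧ PySem.Int.floordiv x 10 ≤ PySem.Int.mod x 10 ∧
          PySem.Int.mod x 10 ≤ hi ∧ CanLH lo (PySem.Int.floordiv x 10) xs)) := by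
  intro xs
  induction xs with
  | nil =>
    intro lo hi x
    simp only [List.nil_append, CanLH, leOpt, decide_eq_true_eq]
    tauto
  | cons b rest ih =>
    intro lo hi x
    simp only [List.cons_append, CanLH, ih]
    tauto

theorem solveA_iff : ∀ (l : List Int) (hi : Int),
    solveA hi l = true ↔ CanLH none hi l.reverse := by
  intro l
  induction l with
  | nil => intro hi; simp [solveA, CanLH, leOpt]
  | cons ai rest ih =>
    intro hi
    rw [List.reverse_cons, canLH_snoc]
    obtain ⟨hu0, hu9⟩ := mod10_bounds ai
    have hfd := fd10 ai
    have hmd := md10 ai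
    by_cases h1 : ai ≤ hi
    · simp only [solveA, if_pos h1, ih]
      constructor
      · intro h; exact Or.inl ⟨h1, h⟩
      · rintro (⟨_, hc⟩ | ⟨h10, htu, _, hc⟩)
        · exact hc
        · exact canLH_mono_hi _ _ (by omega) hc
    · by_cases h2 : ai < 10
      · simp only [solveA, if_neg h1, if_pos h2]
        constructor
        · intro h; cases h
        · rintro (⟨hle, _⟩ | ⟨h10, _⟩) <;> omega
      · by_cases h3 : PySem.Int.floordiv ai 10 > PySem.Int.mod ai 10 ∨ PySem.Int.mod ai 10 > hi
        · simp only [solveA, if_neg h1, if_neg h2, if_pos h3]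
          constructor
          · intro h; cases h
          · rintro (⟨hle, _⟩ | ⟨_, htu, hub, _⟩) <;> omega
        · simp only [solveA, if_neg h1, if_neg h2, if_neg h3, ih]
          constructor
          · intro h; exact Or.inr ⟨by omega, by omega, by omega, h⟩
          · rintro (⟨hle, _⟩ | ⟨_, _, _, hc⟩)
            · omega
            · exact hc

theorem solveB_iff : ∀ (a : List Int) (lo : Option Int), leOpt lo 99 = true →
    (solveB lo a = true ↔ CanLH lo 99 a) := by
  intro a
  induction a with
  | nil => intro lo hlo; simpa [solveB, CanLH] using hlo
  | cons ai rest ih =>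
    intro lo hlo
    obtain ⟨hu0, hu9⟩ := mod10_bounds ai
    have hfd := fd10 ai
    have hmd := md10 ai
    by_cases h100 : 100 ≤ ai
    · simp only [solveB, if_pos h100]
      constructor
      · intro h; cases h
      · rintro (⟨_, hc⟩ | ⟨_, htu, _, _⟩)
        · have := canLH_some_le _ hc; omega
        · have := floordiv10_ge ai h100; omega
    · by_cases hsp : 10 ≤ ai ∧ PySem.Int.floordiv ai 10 ≤ PySem.Int.mod ai 10 ∧
          leOpt lo (PySem.Int.floordiv ai 10) = true
      · simp only [solveB, if_neg h100, if_pos hsp]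
        rw [ih (some (PySem.Int.mod ai 10)) (by simp [leOpt]; omega)]
        constructor
        · intro h; exact Or.inr ⟨hsp.1, hsp.2.1, hsp.2.2, h⟩
        · rintro (⟨_, hc⟩ | ⟨_, _, _, hc⟩)
          · exact canLH_mono_lo _ (by omega) hc
          · exact hc
      · by_cases hw : leOpt lo ai = true
        · simp only [solveB, if_neg h100, if_neg hsp, if_pos hw]
          rw [ih (some ai) (by simp [leOpt]; omega)]
          constructor
          · intro h; exact Or.inl ⟨hw, h⟩
          · rintro (⟨_, hc⟩ | ⟨h10, htu, hlot, _⟩)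
            · exact hc
            · exact absurd ⟨h10, htu, hlot⟩ hsp
        · simp only [solveB, if_neg h100, if_neg hsp, if_neg hw]
          constructor
          · intro h; cases h
          · rintro (⟨hle, _⟩ | ⟨h10, htu, hlot, _⟩)
            · exact absurd hle hw
            · exact absurd ⟨h10, htu, hlot⟩ hsp

theorem solve_eq_alt (a : List Int) : solve a = solve_alt a := by
  have hA : solve a = true ↔ CanLH none 99 a := by
    simpa [solve, List.reverse_reverse] using solveA_iff a.reverse 99
  have hB : solve_alt a = true ↔ CanLH none 99 a := solveB_iff a none rfl
  rw [Bool.eq_iff_iff, hA, hB]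

-- ===== VERDICT (by name: the statement is the Claim_ definition above) =====
theorem solve_spec : Claim_equal_solve := by
  intro a _
  unfold Spec_solve
  exact solve_eq_alt a
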